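-- pv_equiv track=rewrite | github.com/mindedal/advent-of-code | 2025/06/main.py | _segments_from_columns
-- ===== SOURCE A (Python) =====
-- def _segments_from_columns(padded: list[str]) -> list[tuple[int, int]]:
--     """Return column spans for each problem.
--
--     A separator column is one that is entirely spaces across all rows. Any
--     maximal run of non-separator columns forms a segment belonging to a single
--     problem.
--     """
--
--     if not padded:
--         return []
--
--     rows = len(padded)
--     width = len(padded[0])
--
--     separator = [all(padded[r][c] == " " for r in range(rows)) for c in range(width)]
--
--     segments: list[tuple[int, int]] = []
--     c = 0
--     while c < width:
--         if separator[c]: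
--             c += 1
--             continue
--         start = c
--         while c < width and not separator[c]:
--             c += 1
--         segments.append((start, c))
--     return segments
-- ===== SOURCE B (Python) =====
-- def _segments_from_columns(padded: list[str]) -> list[tuple[int, int]]:
--     """Single left-to-right pass with an optional open-segment start.
--
--     Instead of precomputing a separator table and extracting runs with a
--     nested two-pointer while-loop, walk the columns once: open a segment at
--     the first non-separator column, close it at the next separator column
--     (or at the right edge).
--     """
--     if not padded:
--         return []
--     rows = len(padded)
--     width = len(padded[0])
--     segments: list[tuple[int, int]] = []
--     start = None
--     for c in range(width):
--         if all(padded[r][c] == " " for r in range(rows)):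
--             if start is not None:
--                 segments.append((start, c))
--                 start = None
--         elif start is None:
--             start = c
--     if start is not None:
--         segments.append((start, width))
--     return segments
-- ===== Notes on version B (the rewrite author's own statement) =====
-- stated objective: simpler
-- what changed: Replaces the precomputed separator table plus nested two-pointer while-loop run extraction with a single left-to-right pass over the columns keeping an optional open-segment start, closing segments at separator columns or the right edge.
import Mathlib
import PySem

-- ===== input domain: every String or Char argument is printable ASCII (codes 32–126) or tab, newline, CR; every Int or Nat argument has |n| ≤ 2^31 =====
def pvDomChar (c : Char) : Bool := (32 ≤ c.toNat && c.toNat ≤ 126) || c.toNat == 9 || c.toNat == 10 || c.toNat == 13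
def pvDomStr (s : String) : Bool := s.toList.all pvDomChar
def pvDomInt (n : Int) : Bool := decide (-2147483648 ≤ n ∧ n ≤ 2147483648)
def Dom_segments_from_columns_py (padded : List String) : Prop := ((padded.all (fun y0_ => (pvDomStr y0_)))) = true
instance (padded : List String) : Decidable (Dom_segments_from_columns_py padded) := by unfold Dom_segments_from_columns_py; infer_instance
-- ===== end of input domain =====

-- B replaces A's separator table + nested two-pointer run extraction with one
-- left-to-right pass keeping an optional open-segment start (objective: simpler).


-- ===== PORT A =====
-- shared column test: all(padded[r][c] == " " for r in range(rows)); out-of-range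
-- character access (Python IndexError) is totalized with default ' ' — such inputs
-- are excluded by Pre_ below.  padded.getD r "" is exact: 0 ≤ r < len(padded).
def pvColSep (padded : List String) (rows c : Nat) : Bool :=
  (List.range rows).all (fun r => ((PySem.Str.pyGet? (padded.getD r "") (c : Int)).getD ' ') == ' ')

-- inner while: 'while c < width and not separator[c]: c += 1'
def pvInnerA (sep : List Bool) (width c : Nat) : Nat :=
  if h : c < width ∧ sep.getD c false = false then pvInnerA sep width (c + 1) else c
termination_by width - c
decreasing_by omega

-- needed by pvOuterA's termination proof (cited in its decreasing_by)
theorem pvInnerA_ge (sep : List Bool) (width c : Nat) : c ≤ pvInnerA sep width c := by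
  unfold pvInnerA
  split
  · exact Nat.le_trans (Nat.le_succ c) (pvInnerA_ge sep width (c + 1))
  · exact Nat.le_refl c
termination_by width - c
decreasing_by omega

theorem pvInnerA_gt (sep : List Bool) (width c : Nat)
    (hlt : c < width) (hs : sep.getD c false = false) : c < pvInnerA sep width c := by
  rw [pvInnerA, dif_pos ⟨hlt, hs⟩]
  exact Nat.lt_of_lt_of_le (Nat.lt_succ_self c) (pvInnerA_ge sep width (c + 1))

-- outer while: skip separator columns, extract a maximal run [start, c)
def pvOuterA (sep : List Bool) (width c : Nat) (acc : List (Int × Int)) : List (Int × Int) :=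
  if h : c < width then
    if hs : sep.getD c false then pvOuterA sep width (c + 1) acc
    else
      pvOuterA sep width (pvInnerA sep width c)
        (acc ++ [((c : Int), ((pvInnerA sep width c) : Int))])
  else acc
termination_by width - c
decreasing_by
  · omega
  · have := pvInnerA_gt sep width c h (by simpa using hs)
    omega

def segments_from_columns_py (padded : List String) : List (Int × Int) :=
  if padded = [] then []
  else
    let rows := padded.length
    let width := (padded.headD "").toList.length   -- len(padded[0]); padded ≠ []
    let sep := (List.range width).map (fun c => pvColSep padded rows c)
    pvOuterA sep width 0 []

-- ===== PORT B =====
-- one loop body: close an open segment at a separator column, open at a non-separator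
def pvStepB (padded : List String) (rows : Nat)
    (st : Option Nat × List (Int × Int)) (c : Nat) : Option Nat × List (Int × Int) :=
  if pvColSep padded rows c then
    match st.1 with
    | some s => (none, st.2 ++ [((s : Int), (c : Int))])
    | none => st
  else
    match st.1 with
    | none => (some c, st.2)
    | some _ => st

-- 'if start is not None: segments.append((start, width))'
def pvFlushB (width : Nat) (st : Option Nat × List (Int × Int)) : List (Int × Int) :=
  match st.1 with
  | some s => st.2 ++ [((s : Int), (width : Int))]
  | none => st.2

def segments_from_columns_py_alt (padded : List String) : List (Int × Int) :=
  if padded = [] then []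
  else
    let rows := padded.length
    let width := (padded.headD "").toList.length
    pvFlushB width ((List.range width).foldl (pvStepB padded rows) (none, []))

-- ===== PRECONDITION & SPEC =====
-- Pre_ excludes exactly the inputs on which Python A raises IndexError: some column
-- c < len(padded[0]) is out of range for a row r and no earlier row already shows a
-- non-space at c (the all() generator would hit padded[r][c] before short-circuiting).
def Pre_segments_from_columns_py (padded : List String) : Prop :=
  ∀ c, c < (padded.headD "").toList.length → ∀ r, r < padded.length →
    (padded.getD r "").toList.length ≤ c →
      ∃ r', r' < r ∧ c < (padded.getD r' "").toList.length ∧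
        (padded.getD r' "").toList.getD c ' ' ≠ ' '
instance (padded : List String) : Decidable (Pre_segments_from_columns_py padded) := by
  unfold Pre_segments_from_columns_py; infer_instance

def pvWitness_segments_from_columns_py : List String := ["a b"]

def Spec_segments_from_columns_py (padded : List String) (out : List (Int × Int)) : Prop := out = segments_from_columns_py_alt padded
instance (padded : List String) (out : List (Int × Int)) : Decidable (Spec_segments_from_columns_py padded out) := by unfold Spec_segments_from_columns_py; infer_instance

-- ===== CLAIM (what is proved, stated in full; the proofs are below) =====
def Claim_equal_segments_from_columns_py : Prop := ∀ (padded : List String), Dom_segments_from_columns_py padded → Pre_segments_from_columns_py padded → Spec_segments_from_columns_py padded (segments_from_columns_py padded)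

-- ===== LEMMAS AND PROOFS =====

-- The core correspondence: B's fold over the remaining columns [c, width), in either
-- state (no open segment / open segment started at s), equals A's outer loop.
theorem pvMain (padded : List String) (rows width : Nat)
    (sep : List Bool) (hsep : sep = (List.range width).map (fun c => pvColSep padded rows c)) :
    ∀ n c, c + n = width →
      ((∀ acc, pvFlushB width ((List.range' c n).foldl (pvStepB padded rows) (none, acc))
          = pvOuterA sep width c acc)
       ∧ (∀ s acc, pvFlushB width ((List.range' c n).foldl (pvStepB padded rows) (some s, acc))
          = pvOuterA sep width (pvInnerA sep width c)
              (acc ++ [((s : Int), ((pvInnerA sep width c) : Int))]))) := by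
  intro n
  induction n with
  | zero =>
    intro c hc
    have hcw : c = width := by omega
    subst hcw
    constructor
    · intro acc
      rw [pvOuterA, dif_neg (by omega)]
      rfl
    · intro s acc
      rw [pvInnerA, dif_neg (by omega)]
      rw [pvOuterA, dif_neg (by omega)]
      rfl
  | succ n ih =>
    intro c hc
    have hcw : c < width := by omega
    have ih' := ih (c + 1) (by omega)
    have hgetD : sep.getD c false = pvColSep padded rows c := by
      subst hsep
      rw [List.getD_eq_getElem?_getD]
      simp [hcw]
    have hrange : List.range' c (n + 1) = c :: List.range' (c + 1) n := List.range'_succ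
    constructor
    · intro acc
      rw [hrange]
      by_cases hg : pvColSep padded rows c
      · have hstep : pvStepB padded rows (none, acc) c = (none, acc) := by
          simp [pvStepB, hg]
        rw [List.foldl_cons, hstep, ih'.1 acc]
        conv_rhs => rw [pvOuterA]
        rw [dif_pos hcw, dif_pos (by rw [hgetD]; exact hg)]
      · have hstep : pvStepB padded rows (none, acc) c = (some c, acc) := by
          simp [pvStepB, hg]
        rw [List.foldl_cons, hstep, ih'.2 c acc]
        have hinner : pvInnerA sep width c = pvInnerA sep width (c + 1) := by
          rw [pvInnerA, dif_pos ⟨hcw, by rw [hgetD]; simp [hg]⟩]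
        conv_rhs => rw [pvOuterA]
        rw [dif_pos hcw, dif_neg (by rw [hgetD]; simp [hg]), hinner]
    · intro s acc
      rw [hrange]
      by_cases hg : pvColSep padded rows c
      · have hstep : pvStepB padded rows (some s, acc) c
            = (none, acc ++ [((s : Int), (c : Int))]) := by
          simp [pvStepB, hg]
        rw [List.foldl_cons, hstep, ih'.1 (acc ++ [((s : Int), (c : Int))])]
        have hinner : pvInnerA sep width c = c := by
          rw [pvInnerA, dif_neg (by rw [hgetD]; simp [hg])]
        rw [hinner]
        conv_rhs => rw [pvOuterA]
        rw [dif_pos hcw, dif_pos (by rw [hgetD]; exact hg)]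
      · have hstep : pvStepB padded rows (some s, acc) c = (some s, acc) := by
          simp [pvStepB, hg]
        rw [List.foldl_cons, hstep, ih'.2 s acc]
        have hinner : pvInnerA sep width c = pvInnerA sep width (c + 1) := by
          rw [pvInnerA, dif_pos ⟨hcw, by rw [hgetD]; simp [hg]⟩]
        rw [hinner]

-- ===== VERDICT (by name: the statement is the Claim_ definition above) =====
theorem segments_from_columns_py_spec : Claim_equal_segments_from_columns_py := by
  intro padded _hdom _hpre
  unfold Spec_segments_from_columns_py segments_from_columns_py segments_from_columns_py_alt
  by_cases hnil : padded = []
  · simp [hnil]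
  · simp only [if_neg hnil]
    have h := (pvMain padded padded.length (padded.headD "").toList.length
      ((List.range (padded.headD "").toList.length).map
        (fun c => pvColSep padded padded.length c)) rfl
      (padded.headD "").toList.length 0 (by omega)).1 []
    rw [← List.range_eq_range'] at h
    exact h.symm
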